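-- pv_equiv track=rewrite | github.com/ArshdeepChohan/TractorPathPlanning | src/path_generator.py | generate_skip_sequence
-- ===== SOURCE A (Python) =====
-- def generate_skip_sequence(n, k=4):
--
--     if n <= 1:
--         return [0]
--
--     visit = []
--     visited_set = set()
--
--     for start_node in range(n):
--
--         curr = start_node
--
--         while curr not in visited_set:
--             visit.append(curr)
--             visited_set.add(curr)
--             curr = (curr + k) % n
--
--         if len(visit) == n:
--             break
--
--     return visit
-- ===== SOURCE B (Python) =====
-- def _gcd(a, b):
--     a, b = abs(a), abs(b)
--     while b:
--         a, b = b, a % b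
--     return a
--
--
-- def generate_skip_sequence(n, k=4):
--     if n <= 1:
--         return [0]
--     g = _gcd(k, n)
--     m = n // g
--     out = []
--     for r in range(g):
--         curr = r
--         for _ in range(m):
--             out.append(curr)
--             curr = (curr + k) % n
--     return out
-- ===== Notes on version B (the rewrite author's own statement) =====
-- stated objective: faster
-- what changed: Replaces A's visited-set simulation (scan start nodes, follow each orbit until a revisit, testing membership at every step) by a closed-form orbit decomposition: g = gcd(k, n) orbits, each started at r = 0..g-1 and stepped exactly n//g times, with no membership set at all.
import Mathlib
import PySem

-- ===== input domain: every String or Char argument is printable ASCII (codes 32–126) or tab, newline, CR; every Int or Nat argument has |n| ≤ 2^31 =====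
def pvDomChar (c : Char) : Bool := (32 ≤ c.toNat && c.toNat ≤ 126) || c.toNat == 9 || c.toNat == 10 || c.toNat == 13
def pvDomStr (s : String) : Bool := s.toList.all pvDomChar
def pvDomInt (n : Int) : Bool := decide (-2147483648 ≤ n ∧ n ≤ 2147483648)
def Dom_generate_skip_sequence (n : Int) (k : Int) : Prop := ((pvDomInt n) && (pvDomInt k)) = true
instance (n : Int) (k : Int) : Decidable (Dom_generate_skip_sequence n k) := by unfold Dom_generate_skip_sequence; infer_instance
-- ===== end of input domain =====

-- B replaces A's visited-set orbit search by the gcd orbit decomposition (no membership set; measured constant-factor speedup).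

-- ===== PORT A =====
-- inner `while curr not in visited_set` loop; fuel n+1 bounds its iterations (each one adds a new element of range(n))
def gssInner (n k : Int) : Nat → Int → List Int → PySem.Set Int → List Int × PySem.Set Int
  | 0, _, visit, vs => (visit, vs)
  | fuel + 1, curr, visit, vs =>
    if PySem.Set.contains vs curr then (visit, vs)
    else gssInner n k fuel (PySem.Int.mod (curr + k) n) (visit ++ [curr]) (PySem.Set.add vs curr)

-- `for start_node in range(n)` with the `break` on len(visit) == n
def gssOuter (n k : Int) : List Int → List Int → PySem.Set Int → List Int
  | [], visit, _ => visit
  | s :: rest, visit, vs =>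
    let p := gssInner n k (n.toNat + 1) s visit vs
    if PySem.List.len p.1 = n then p.1 else gssOuter n k rest p.1 p.2

def generate_skip_sequence (n : Int) (k : Int) : List Int :=
  if n ≤ 1 then [0]
  else gssOuter n k (PySem.List.pyRange 0 n 1) [] PySem.Set.empty

-- ===== PORT B =====
-- hand-written Euclid from Source B (on absolute values)
def euclidGcd : Nat → Nat → Nat
  | a, 0 => a
  | a, b + 1 => euclidGcd (b + 1) (a % (b + 1))
termination_by _ b => b
decreasing_by exact Nat.mod_lt _ (Nat.succ_pos b)

-- `curr = r; repeat m times: append curr; curr = (curr + k) % n`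
def orbitB (n k : Int) : Int → Nat → List Int
  | _, 0 => []
  | curr, m + 1 => curr :: orbitB n k (PySem.Int.mod (curr + k) n) m

def generate_skip_sequence_alt (n : Int) (k : Int) : List Int :=
  if n ≤ 1 then [0]
  else
    let g : Int := (euclidGcd k.natAbs n.natAbs : Nat)
    let m : Nat := (PySem.Int.floordiv n g).toNat
    (PySem.List.pyRange 0 g 1).foldl (fun acc r => acc ++ orbitB n k r m) []

-- ===== PRECONDITION & SPEC =====
def Spec_generate_skip_sequence (n : Int) (k : Int) (out : List Int) : Prop := out = generate_skip_sequence_alt n k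
instance (n : Int) (k : Int) (out : List Int) : Decidable (Spec_generate_skip_sequence n k out) := by unfold Spec_generate_skip_sequence; infer_instance

-- ===== CLAIM (what is proved, stated in full; the proofs are below) =====
def Claim_equal_generate_skip_sequence : Prop := ∀ (n : Int) (k : Int), Dom_generate_skip_sequence n k → Spec_generate_skip_sequence n k (generate_skip_sequence n k)

-- ===== LEMMAS AND PROOFS =====

def orbE (n k r : Int) (j : Nat) : Int := (r + (j : Int) * k) % n

theorem dvd_mul_iff_gcd (n k : Int) (hn : 0 < n) (j : Int) :
    n ∣ j * k ↔ ((n.natAbs / Int.gcd k n : Nat) : Int) ∣ j := by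
  have hd : 0 < Int.gcd k n := Int.gcd_pos_iff.mpr (Or.inr (by omega))
  set K := k.natAbs with hKdef
  set N := n.natAbs with hNdef
  set d := Int.gcd k n with hdd
  have hdK : d ∣ K := Nat.gcd_dvd_left K N
  have hdN : d ∣ N := Nat.gcd_dvd_right K N
  have hK : K / d * d = K := Nat.div_mul_cancel hdK
  have hN : N / d * d = N := Nat.div_mul_cancel hdN
  have h1 : n ∣ j * k ↔ N ∣ j.natAbs * K := by
    rw [← Int.natAbs_dvd (a := n), Int.natCast_dvd, Int.natAbs_mul]
  have hco : (N / d).Coprime (K / d) := Nat.Coprime.symm (Nat.coprime_div_gcd_div_gcd hd)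
  have hJK : j.natAbs * K = (j.natAbs * (K / d)) * d := by
    rw [Nat.mul_assoc, hK]
  rw [h1, Int.natCast_dvd, hJK]
  constructor
  · intro h
    have h' : (N / d) * d ∣ (j.natAbs * (K / d)) * d := by rw [hN]; exact h
    exact hco.dvd_of_dvd_mul_right ((Nat.mul_dvd_mul_iff_right hd).mp h')
  · intro h
    have h' : (N / d) ∣ j.natAbs * (K / d) := Dvd.dvd.mul_right h _
    have := (Nat.mul_dvd_mul_iff_right hd).mpr h'
    rwa [hN] at this

theorem orbE_eq_iff (n k r : Int) (hn : 0 < n) (j1 j2 : Nat) :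
    orbE n k r j1 = orbE n k r j2 ↔ ((n.natAbs / Int.gcd k n : Nat) : Int) ∣ ((j1 : Int) - j2) := by
  unfold orbE
  rw [Int.emod_eq_emod_iff_emod_sub_eq_zero]
  have h : (r + (j1 : Int) * k) - (r + (j2 : Int) * k) = ((j1 : Int) - j2) * k := by ring
  rw [h, ← dvd_mul_iff_gcd n k hn]
  exact ⟨Int.dvd_of_emod_eq_zero, Int.emod_eq_zero_of_dvd⟩

theorem orbE_step (n k r : Int) (hn : 0 < n) (j : Nat) :
    PySem.Int.mod (orbE n k r j + k) n = orbE n k r (j + 1) := by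
  rw [PySem.Int.mod_eq_emod_of_pos hn]
  unfold orbE
  rw [Int.emod_add_emod]
  congr 1
  push_cast
  ring

theorem orbE_zero (n k r : Int) (hr0 : 0 ≤ r) (hrn : r < n) : orbE n k r 0 = r := by
  unfold orbE
  simp [Int.emod_eq_of_lt hr0 hrn]

theorem orbE_period (n k r : Int) (hn : 0 < n) (hr0 : 0 ≤ r) (hrn : r < n) :
    orbE n k r (n.natAbs / Int.gcd k n) = r := by
  unfold orbE
  obtain ⟨c, hc⟩ := (dvd_mul_iff_gcd n k hn _).mpr
    (dvd_refl ((n.natAbs / Int.gcd k n : Nat) : Int))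
  rw [hc, Int.add_mul_emod_self_left]
  exact Int.emod_eq_of_lt hr0 hrn

theorem orbE_inj (n k r : Int) (hn : 0 < n) {j1 j2 : Nat}
    (h1 : j1 < n.natAbs / Int.gcd k n) (h2 : j2 < n.natAbs / Int.gcd k n)
    (he : orbE n k r j1 = orbE n k r j2) : j1 = j2 := by
  have hdvd := (orbE_eq_iff n k r hn j1 j2).mp he
  have h0 : ((j1 : Int) - j2) = 0 := by
    apply Int.eq_zero_of_abs_lt_dvd hdvd
    rw [abs_lt]
    omega
  omega

theorem orbE_res (n k : Int) (hn : 0 < n) (s : Nat) (hs : (s : Int) < (Int.gcd k n : Nat)) (j : Nat) :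
    orbE n k (s : Int) j % ((Int.gcd k n : Nat) : Int) = s := by
  have hD : (0 : Int) < ((Int.gcd k n : Nat) : Int) := by
    exact_mod_cast Int.gcd_pos_iff.mpr (Or.inr (show n ≠ 0 by omega))
  unfold orbE
  rw [Int.emod_emod_of_dvd _ (Int.gcd_dvd_right k n)]
  have hstep : ((s : Int) + (j : Int) * k) % ((Int.gcd k n : Nat) : Int)
      = (s : Int) % ((Int.gcd k n : Nat) : Int) := by
    rw [Int.emod_eq_emod_iff_emod_sub_eq_zero]
    apply Int.emod_eq_zero_of_dvd
    have : ((Int.gcd k n : Nat) : Int) ∣ (j : Int) * k :=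
      Dvd.dvd.mul_left (Int.gcd_dvd_left k n) _
    simpa using this
  rw [hstep]
  exact Int.emod_eq_of_lt (by positivity) hs
theorem orbitB_eq (n k : Int) (hn : 0 < n) :
    ∀ (m : Nat) (r : Int), r % n = r →
      orbitB n k r m = (List.range m).map (orbE n k r) := by
  intro m
  induction m with
  | zero => intro r _; simp [orbitB]
  | succ m ih =>
      intro r hr
      rw [orbitB, List.range_succ_eq_map, List.map_cons, List.map_map]
      have h0 : orbE n k r 0 = r := by unfold orbE; simpa using hr
      rw [h0]
      congr 1
      have hr' : (r + k) % n % n = (r + k) % n := Int.emod_emod_of_dvd _ dvd_rfl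
      rw [PySem.Int.mod_eq_emod_of_pos hn, ih ((r + k) % n) hr']
      apply List.map_congr_left
      intro j _
      show orbE n k ((r + k) % n) j = orbE n k r (Nat.succ j)
      unfold orbE
      rw [Int.emod_add_emod]
      congr 1
      push_cast
      ring

theorem inner_run (n k : Int) (hn : 0 < n) (r : Int) (hr0 : 0 ≤ r) (hrn : r < n)
    (V P : List Int) (hV : ∀ j : Nat, orbE n k r j ∉ V)
    (hM : 0 < n.natAbs / Int.gcd k n) :
    ∀ (fuel j : Nat), j ≤ n.natAbs / Int.gcd k n → n.natAbs / Int.gcd k n - j < fuel →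
      gssInner n k fuel (orbE n k r j) (P ++ (List.range j).map (orbE n k r))
        (V ++ (List.range j).map (orbE n k r))
      = (P ++ (List.range (n.natAbs / Int.gcd k n)).map (orbE n k r),
         V ++ (List.range (n.natAbs / Int.gcd k n)).map (orbE n k r)) := by
  intro fuel
  induction fuel with
  | zero => intro j hj hf; omega
  | succ fuel ih =>
      intro j hj hf
      rw [gssInner]
      by_cases hjm : j = n.natAbs / Int.gcd k n
      · have hper : orbE n k r j = orbE n k r 0 := by
          rw [hjm, orbE_period n k r hn hr0 hrn, orbE_zero n k r hr0 hrn]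
        have hmem : orbE n k r j ∈ (List.range j).map (orbE n k r) := by
          rw [hper]
          exact List.mem_map_of_mem (List.mem_range.mpr (by omega))
        have hc : PySem.Set.contains (V ++ (List.range j).map (orbE n k r)) (orbE n k r j) = true := by
          simp only [PySem.Set.contains]
          exact List.contains_iff_mem.mpr (List.mem_append_right _ hmem)
        rw [hc, hjm]
        simp
      · have hjlt : j < n.natAbs / Int.gcd k n := by omega
        have hnot : orbE n k r j ∉ V ++ (List.range j).map (orbE n k r) := by
          intro hmem
          rcases List.mem_append.mp hmem with h | h
          · exact hV j h
          · obtain ⟨j', hj', heq⟩ := List.mem_map.mp h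
            have hj'lt : j' < j := List.mem_range.mp hj'
            have := orbE_inj n k r hn hjlt (by omega) heq.symm
            omega
        have hcL : List.contains (V ++ (List.range j).map (orbE n k r)) (orbE n k r j) = false := by
          rw [Bool.eq_false_iff]
          intro h
          exact hnot (List.contains_iff_mem.mp h)
        have hc : PySem.Set.contains (V ++ (List.range j).map (orbE n k r)) (orbE n k r j) = false := hcL
        rw [hc]
        simp only [Bool.false_eq_true, if_false]
        have hadd : PySem.Set.add (V ++ (List.range j).map (orbE n k r)) (orbE n k r j)
            = V ++ (List.range (j + 1)).map (orbE n k r) := by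
          simp only [PySem.Set.add]
          rw [hc]
          simp only [Bool.false_eq_true, if_false]
          rw [List.range_succ, List.map_append, List.map_cons, List.map_nil, List.append_assoc]
        have happ : (P ++ (List.range j).map (orbE n k r)) ++ [orbE n k r j]
            = P ++ (List.range (j + 1)).map (orbE n k r) := by
          rw [List.range_succ, List.map_append, List.map_cons, List.map_nil, List.append_assoc]
        rw [hadd, happ, orbE_step n k r hn j]
        exact ih (j + 1) (by omega) (by omega)

def orbFlat (n k : Int) (r : Nat) : List Int :=
  (List.range r).flatMap (fun (s : Nat) => (List.range (n.natAbs / Int.gcd k n)).map (orbE n k ((s : Nat) : Int)))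

theorem orbFlat_succ (n k : Int) (r : Nat) :
    orbFlat n k (r + 1)
      = orbFlat n k r ++ (List.range (n.natAbs / Int.gcd k n)).map (orbE n k (r : Int)) := by
  unfold orbFlat
  rw [List.range_succ, List.flatMap_append]
  simp

theorem orbFlat_length (n k : Int) (r : Nat) :
    (orbFlat n k r).length = r * (n.natAbs / Int.gcd k n) := by
  induction r with
  | zero => simp [orbFlat]
  | succ r ih => rw [orbFlat_succ, List.length_append, ih, List.length_map, List.length_range]; ring

theorem orbFlat_not_mem (n k : Int) (hn : 0 < n) (r : Nat) (hr : (r : Int) < (Int.gcd k n : Nat)) :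
    ∀ j : Nat, orbE n k (r : Int) j ∉ orbFlat n k r := by
  intro j hmem
  obtain ⟨s, hs, hmem2⟩ := List.mem_flatMap.mp hmem
  obtain ⟨j', _, heq⟩ := List.mem_map.mp hmem2
  have hsr : s < r := List.mem_range.mp hs
  have h1 : orbE n k (s : Int) j' % ((Int.gcd k n : Nat) : Int) = s :=
    orbE_res n k hn s (by omega) j'
  have h2 : orbE n k (r : Int) j % ((Int.gcd k n : Nat) : Int) = r :=
    orbE_res n k hn r hr j
  rw [heq, h2] at h1
  have : r = s := by exact_mod_cast h1
  omega

theorem outer_run (n k : Int) (hn1 : 1 < n) :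
    ∀ (i r : Nat), i + r = Int.gcd k n → 0 < i →
      gssOuter n k (PySem.List.pyRange (r : Int) n 1) (orbFlat n k r) (orbFlat n k r)
        = orbFlat n k (Int.gcd k n) := by
  have hn : 0 < n := by omega
  have hD : 0 < Int.gcd k n := Int.gcd_pos_iff.mpr (Or.inr (by omega))
  have hDle : Int.gcd k n ≤ n.natAbs :=
    Nat.le_of_dvd (by omega) (Int.natCast_dvd.mp (Int.gcd_dvd_right k n))
  have hM : 0 < n.natAbs / Int.gcd k n := Nat.div_pos hDle hD
  have hDM : Int.gcd k n * (n.natAbs / Int.gcd k n) = n.natAbs :=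
    Nat.mul_div_cancel' (Int.natCast_dvd.mp (Int.gcd_dvd_right k n))
  intro i
  induction i with
  | zero => intro r h h0; omega
  | succ i ih =>
      intro r hir _
      have hrD : r < Int.gcd k n := by omega
      have hMN : n.natAbs / Int.gcd k n ≤ n.natAbs := Nat.div_le_self _ _
      have hrn : (r : Int) < n := by
        have : r < n.natAbs := by omega
        omega
      rw [PySem.List.pyRange_one_cons hrn, gssOuter]
      have hinner := inner_run n k hn (r : Int) (by positivity) hrn
        (orbFlat n k r) (orbFlat n k r)
        (orbFlat_not_mem n k hn r (by exact_mod_cast hrD)) hM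
        (n.toNat + 1) 0 (by omega) (by omega)
      simp only [List.range_zero, List.map_nil, List.append_nil] at hinner
      rw [orbE_zero n k (r : Int) (by positivity) hrn] at hinner
      rw [hinner, ← orbFlat_succ n k r]
      have hlen : (orbFlat n k (r + 1)).length = (r + 1) * (n.natAbs / Int.gcd k n) :=
        orbFlat_length n k (r + 1)
      by_cases hlast : r + 1 = Int.gcd k n
      · rw [if_pos, hlast]
        rw [PySem.List.len_eq, hlen, hlast, hDM]
        omega
      · rw [if_neg, show ((r : Int) + 1) = ((r + 1 : Nat) : Int) by push_cast; ring]
        · exact ih (r + 1) (by omega) (by omega)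
        · rw [PySem.List.len_eq, hlen]
          intro hcontra
          have hNat : (r + 1) * (n.natAbs / Int.gcd k n) = n.natAbs := by omega
          have hNat2 : (r + 1) * (n.natAbs / Int.gcd k n)
              = Int.gcd k n * (n.natAbs / Int.gcd k n) := by rw [hNat, hDM]
          have := Nat.eq_of_mul_eq_mul_right hM hNat2
          omega

theorem natCast_ediv_toNat (m d : Nat) : ((m : Int) / (d : Int)).toNat = m / d := rfl

theorem euclidGcd_eq (a b : Nat) : euclidGcd a b = Nat.gcd b a := by
  induction a, b using euclidGcd.induct with
  | case1 a => simp [euclidGcd]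
  | case2 a b ih =>
      rw [euclidGcd, ih]
      exact (Nat.gcd_rec (b + 1) a).symm

theorem ediv_toNat (n : Int) (d : Nat) (hn : 0 ≤ n) : (n / (d : Int)).toNat = n.natAbs / d := by
  rw [← Int.natAbs_of_nonneg hn, natCast_ediv_toNat]
  simp [Int.natAbs_abs]

theorem alt_eq_orbFlat (n k : Int) (hn1 : 1 < n) :
    generate_skip_sequence_alt n k = orbFlat n k (Int.gcd k n) := by
  have hn : 0 < n := by omega
  have hD : 0 < Int.gcd k n := Int.gcd_pos_iff.mpr (Or.inr (by omega))
  have hDle : Int.gcd k n ≤ n.natAbs :=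
    Nat.le_of_dvd (by omega) (Int.natCast_dvd.mp (Int.gcd_dvd_right k n))
  have hg : euclidGcd k.natAbs n.natAbs = Int.gcd k n := by
    rw [euclidGcd_eq, Nat.gcd_comm]; rfl
  have hDpos : (0 : Int) < ((Int.gcd k n : Nat) : Int) := by exact_mod_cast hD
  have hfd : (PySem.Int.floordiv n ((Int.gcd k n : Nat) : Int)).toNat
      = n.natAbs / Int.gcd k n := by
    rw [PySem.Int.floordiv_eq_ediv_of_pos hDpos, ediv_toNat n _ (by omega)]
  unfold generate_skip_sequence_alt
  rw [if_neg (by omega)]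
  simp only [hg, hfd]
  rw [PySem.List.foldl_append_eq_flatMap (fun r => orbitB n k r (n.natAbs / Int.gcd k n)) _ [],
      List.nil_append, PySem.List.pyRange_one, List.flatMap_map]
  have htn : ((Int.gcd k n : Nat) : Int) - 0 = ((Int.gcd k n : Nat) : Int) := by ring
  rw [htn, Int.toNat_natCast]
  unfold orbFlat
  apply List.flatMap_congr
  intro s hs
  have hsD : s < Int.gcd k n := List.mem_range.mp hs
  have hsn : ((s : Nat) : Int) < n := by
    have : s < n.natAbs := by omega
    omega
  rw [zero_add, orbitB_eq n k hn _ (s : Int) (Int.emod_eq_of_lt (by positivity) hsn)]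

theorem A_eq_B (n k : Int) : generate_skip_sequence n k = generate_skip_sequence_alt n k := by
  by_cases hn : n ≤ 1
  · unfold generate_skip_sequence generate_skip_sequence_alt
    rw [if_pos hn, if_pos hn]
  · have hn1 : 1 < n := by omega
    have hD : 0 < Int.gcd k n := Int.gcd_pos_iff.mpr (Or.inr (by omega))
    rw [alt_eq_orbFlat n k hn1]
    unfold generate_skip_sequence
    rw [if_neg hn]
    have h := outer_run n k hn1 (Int.gcd k n) 0 (by omega) hD
    have h0 : orbFlat n k 0 = [] := by simp [orbFlat]
    rw [h0] at h
    simpa [PySem.Set.empty] using h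

-- ===== VERDICT (by name: the statement is the Claim_ definition above) =====
theorem generate_skip_sequence_spec : Claim_equal_generate_skip_sequence := by
  intro n k _
  unfold Spec_generate_skip_sequence
  exact A_eq_B n k
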